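-- pv_equiv track=rewrite | github.com/vitte-lang/vitte | tools/update_diagnostics_ftl.py | message_key
-- ===== SOURCE A (Python) =====
-- def message_key(msg: str) -> str:
--     out: list[str] = []
--     prev_us = False
--     for c in msg:
--         if c.isalnum():
--             out.append(c.lower())
--             prev_us = False
--         elif not prev_us:
--             out.append("_")
--             prev_us = True
--     return "".join(out).strip("_")
-- ===== SOURCE B (Python) =====
-- def message_key(msg: str) -> str:
--     # Run-based slugify: split into maximal alnum / non-alnum runs, no prev_us flag.
--     pieces = []
--     i = 0
--     n = len(msg)
--     while i < n:
--         j = i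
--         if msg[i].isalnum():
--             while j < n and msg[j].isalnum():
--                 j += 1
--             pieces.append(msg[i:j].lower())
--         else:
--             while j < n and not msg[j].isalnum():
--                 j += 1
--             pieces.append("_")
--         i = j
--     return "".join(pieces).strip("_")
-- ===== Notes on version B (the rewrite author's own statement) =====
-- stated objective: alternative
-- what changed: Replaces the char-by-char loop with its prev_us flag by a stateless run-based traversal: split the string into maximal alnum/non-alnum runs, lowercase each alnum run, emit a single underscore per non-alnum run.
import Mathlib
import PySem

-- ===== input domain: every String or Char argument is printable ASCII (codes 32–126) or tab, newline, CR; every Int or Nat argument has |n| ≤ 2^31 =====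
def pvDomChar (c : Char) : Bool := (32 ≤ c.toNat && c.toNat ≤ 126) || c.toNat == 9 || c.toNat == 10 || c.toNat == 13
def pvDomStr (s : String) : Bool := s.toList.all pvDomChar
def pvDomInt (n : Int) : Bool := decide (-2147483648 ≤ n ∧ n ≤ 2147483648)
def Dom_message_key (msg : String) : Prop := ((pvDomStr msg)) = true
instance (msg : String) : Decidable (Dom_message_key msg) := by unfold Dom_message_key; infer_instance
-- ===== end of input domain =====

-- B replaces A's char-by-char loop with a prev_us flag by a stateless run-based traversal (alternative decomposition, same cost).

-- ===== PORT A =====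
-- A's loop body: state (out, prev_us)
def aStep (acc : List Char × Bool) (c : Char) : List Char × Bool :=
  if PySem.Chars.isalnum c then (acc.1 ++ [PySem.Chars.lowerChar c], false)
  else if !acc.2 then (acc.1 ++ ['_'], true)
  else acc

def message_key (msg : String) : String :=
  let st := msg.toList.foldl aStep ([], false)
  String.ofList (PySem.Chars.stripChars st.1 ['_'])

-- ===== PORT B =====
-- B's run loop: consume a maximal alnum run (lowercased) or a maximal non-alnum run (one '_').
def mkRuns : List Char → List Char
  | [] => []
  | c :: rest =>
    if PySem.Chars.isalnum c then
      ((c :: rest).takeWhile PySem.Chars.isalnum).map PySem.Chars.lowerChar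
        ++ mkRuns ((c :: rest).dropWhile PySem.Chars.isalnum)
    else
      '_' :: mkRuns ((c :: rest).dropWhile (fun x => !PySem.Chars.isalnum x))
termination_by l => l.length
decreasing_by
  · simp_all
    exact List.length_dropWhile_le _ _
  · simp_all
    exact List.length_dropWhile_le _ _

def message_key_alt (msg : String) : String :=
  String.ofList (PySem.Chars.stripChars (mkRuns msg.toList) ['_'])

-- ===== PRECONDITION & SPEC =====
def Spec_message_key (msg : String) (out : String) : Prop := out = message_key_alt msg
instance (msg : String) (out : String) : Decidable (Spec_message_key msg out) := by unfold Spec_message_key; infer_instance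

-- ===== CLAIM (what is proved, stated in full; the proofs are below) =====
def Claim_equal_message_key : Prop := ∀ (msg : String), Dom_message_key msg → Spec_message_key msg (message_key msg)

-- ===== LEMMAS AND PROOFS =====

-- A's loop as a structural recursion on (chars, prev_us)
def aLoop : List Char → Bool → List Char
  | [], _ => []
  | c :: rest, prev =>
    if PySem.Chars.isalnum c then PySem.Chars.lowerChar c :: aLoop rest false
    else if !prev then '_' :: aLoop rest true
    else aLoop rest prev

theorem foldl_eq_aLoop (l : List Char) (acc : List Char) (prev : Bool) :
    (l.foldl aStep (acc, prev)).1 = acc ++ aLoop l prev := by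
  induction l generalizing acc prev with
  | nil => simp [aLoop]
  | cons c rest ih =>
    simp only [List.foldl_cons, aStep, aLoop]
    by_cases h : PySem.Chars.isalnum c = true
    · simp [h, ih]
    · by_cases hp : prev
      · simp [h, hp, ih]
      · simp [h, hp, ih]

theorem mkRuns_cons_alnum (c : Char) (rest : List Char)
    (h : PySem.Chars.isalnum c = true) :
    mkRuns (c :: rest) = PySem.Chars.lowerChar c :: mkRuns rest := by
  rw [mkRuns]
  simp only [h, if_pos, List.takeWhile_cons, List.dropWhile_cons]
  cases rest with
  | nil => simp [mkRuns]
  | cons d rest' =>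
    by_cases hd : PySem.Chars.isalnum d = true
    · conv_rhs => rw [mkRuns]
      simp [hd]
    · simp [hd]

theorem aLoop_eq_mkRuns (l : List Char) :
    aLoop l false = mkRuns l ∧
    aLoop l true = mkRuns (l.dropWhile (fun x => !PySem.Chars.isalnum x)) := by
  induction l with
  | nil => simp [aLoop, mkRuns]
  | cons c rest ih =>
    by_cases h : PySem.Chars.isalnum c = true
    · constructor
      · rw [mkRuns_cons_alnum c rest h]
        simp [aLoop, h, ih.1]
      · rw [List.dropWhile_cons]
        simp only [h, Bool.not_true]
        rw [if_neg (by simp)]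
        rw [mkRuns_cons_alnum c rest h]
        simp [aLoop, h, ih.1]
    · constructor
      · rw [mkRuns]
        simp [aLoop, h, ih.2]
      · rw [List.dropWhile_cons]
        simp only [h]
        rw [if_pos (by simp)]
        simp [aLoop, h, ih.2]

-- ===== VERDICT (by name: the statement is the Claim_ definition above) =====
theorem message_key_spec : Claim_equal_message_key := by
  intro msg _
  unfold Spec_message_key message_key message_key_alt
  simp only [foldl_eq_aLoop, List.nil_append, (aLoop_eq_mkRuns msg.toList).1]
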